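-- pv_equiv track=rewrite | github.com/kdbalabanov/HackerRank-Solutions | HackerRank/ProblemSolving/Algorithms/Strings/PythonSolutions/FunnyString.py | funnyString
-- ===== SOURCE A (Python) =====
-- def funnyString(s):
--     sl = [ord(x) for x in s]
--     slr = sl[::-1]
--     sl_diff = [abs(x - sl[indx + 1]) for indx, x in enumerate(sl) if indx + 1 < len(sl)]
--     slr_diff = [abs(x - slr[indx + 1]) for indx, x in enumerate(slr) if indx + 1 < len(slr)]
--     if sl_diff == slr_diff:
--         return 'Funny'
--     else:
--         return 'Not Funny'
-- ===== SOURCE B (Python) =====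
-- def funnyString(s):
--     codes = [ord(c) for c in s]
--     i, j = 0, len(codes) - 1
--     while i < j:
--         if abs(codes[i] - codes[i + 1]) != abs(codes[j] - codes[j - 1]):
--             return 'Not Funny'
--         i += 1
--         j -= 1
--     return 'Funny'
-- ===== Notes on version B (the rewrite author's own statement) =====
-- stated objective: faster
-- what changed: B replaces A's materialisation of the reversed code list and two full difference lists compared wholesale by a two-pointer in-place scan that compares symmetric adjacent differences directly, exits at the first mismatch, and builds no difference lists at all.
import Mathlib
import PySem

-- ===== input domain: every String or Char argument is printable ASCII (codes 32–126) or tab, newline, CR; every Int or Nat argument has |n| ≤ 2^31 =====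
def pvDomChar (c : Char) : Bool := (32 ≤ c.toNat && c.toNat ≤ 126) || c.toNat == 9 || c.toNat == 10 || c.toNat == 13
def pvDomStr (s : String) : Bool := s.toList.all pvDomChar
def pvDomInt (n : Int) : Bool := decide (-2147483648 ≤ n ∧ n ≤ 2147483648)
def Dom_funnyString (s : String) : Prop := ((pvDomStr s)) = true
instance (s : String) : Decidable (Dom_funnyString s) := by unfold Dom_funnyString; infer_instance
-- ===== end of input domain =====

-- B is a two-pointer in-place scan with early exit, comparing symmetric adjacent differences
-- directly instead of A's reversed list plus two materialised difference lists; objective: faster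
-- (constant factor, measured).

-- ===== PORT A =====
-- A's comprehension [abs(x - l[indx+1]) for indx, x in enumerate(l) if indx+1 < len(l)],
-- applied by A to sl and to slr.  The guard makes the index l[indx+1] in range, so
-- pyGetD with default 0 is exact here.
def pvAdjDiffA (l : List Int) : List Int :=
  ((PySem.List.enumerate l 0).filter (fun p => decide (p.1 + 1 < (l.length : Int)))).map
    (fun p => |p.2 - PySem.List.pyGetD l (p.1 + 1) 0|)

def funnyString (s : String) : String :=
  let sl : List Int := s.toList.map (fun x => (x.toNat : Int))
  -- sl[::-1]; slice? with step -1 is never none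
  let slr : List Int := (PySem.List.slice? sl none none (-1)).getD []
  let sl_diff := pvAdjDiffA sl
  let slr_diff := pvAdjDiffA slr
  if sl_diff = slr_diff then "Funny" else "Not Funny"

-- ===== PORT B =====
-- B's while loop; every index it touches is in range (0 ≤ i < j ≤ len-1), so getD 0 is exact.
-- Python's initial j = len(codes) - 1 is -1 on the empty string and the loop is skipped;
-- Nat subtraction gives j = 0 there and the loop is likewise skipped.
def pvLoopB (codes : List Int) (i j : Nat) : String :=
  if i < j then
    if |codes.getD i 0 - codes.getD (i + 1) 0| ≠ |codes.getD j 0 - codes.getD (j - 1) 0| then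
      "Not Funny"
    else
      pvLoopB codes (i + 1) (j - 1)
  else "Funny"
termination_by j - i

def funnyString_alt (s : String) : String :=
  let codes : List Int := s.toList.map (fun c => (c.toNat : Int))
  pvLoopB codes 0 (codes.length - 1)

-- ===== PRECONDITION & SPEC =====
def Spec_funnyString (s : String) (out : String) : Prop := out = funnyString_alt s
instance (s : String) (out : String) : Decidable (Spec_funnyString s out) := by unfold Spec_funnyString; infer_instance

-- ===== CLAIM (what is proved, stated in full; the proofs are below) =====
def Claim_equal_funnyString : Prop := ∀ (s : String), Dom_funnyString s → Spec_funnyString s (funnyString s)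

-- ===== LEMMAS AND PROOFS =====

-- the adjacent-difference list
def pvZDiff (l : List Int) : List Int :=
  (l.zip l.tail).map (fun p => |p.1 - p.2|)

-- A's guard 'indx + 1 < len(l)' keeps every enumerated pair except the last one
theorem pvFilter_eq (l : List Int) :
    (PySem.List.enumerate l 0).filter (fun p => decide (p.1 + 1 < (l.length : Int)))
      = PySem.List.enumerate l.dropLast 0 := by
  rcases l.eq_nil_or_concat with rfl | ⟨xs, a, rfl⟩
  · simp [PySem.List.enumerate_nil]
  · rw [List.concat_eq_append, PySem.List.enumerate_append, List.filter_append]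
    have h1 : (PySem.List.enumerate xs 0).filter
        (fun p => decide (p.1 + 1 < ((xs ++ [a]).length : Int))) = PySem.List.enumerate xs 0 := by
      apply List.filter_eq_self.2
      intro p hp
      rcases (PySem.List.mem_enumerate_iff xs 0 p).1 hp with ⟨k, hk, rfl⟩
      simp only [List.length_append, List.length_singleton, decide_eq_true_eq]
      push_cast
      omega
    have h2 : (PySem.List.enumerate [a] (0 + xs.length)).filter
        (fun p => decide (p.1 + 1 < ((xs ++ [a]).length : Int))) = [] := by
      simp only [PySem.List.enumerate_cons, PySem.List.enumerate_nil, List.filter_cons,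
        List.filter_nil, List.length_append, List.length_singleton, decide_eq_true_eq]
      rw [if_neg]
      push_cast
      omega
    rw [h1, h2, List.append_nil, List.dropLast_concat]

theorem pvAdjDiffA_eq_zdiff (l : List Int) : pvAdjDiffA l = pvZDiff l := by
  unfold pvAdjDiffA pvZDiff
  rw [pvFilter_eq]
  apply List.ext_getElem
  · simp [PySem.List.length_enumerate]
  · intro i h1 h2
    have hi : i + 1 < l.length := by
      simp only [List.length_map, PySem.List.length_enumerate, List.length_dropLast] at h1
      omega
    simp only [List.getElem_map, PySem.List.getElem_enumerate, List.getElem_zip,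
      List.getElem_tail, List.getElem_dropLast]
    have hcast : (0 : Int) + (i : Int) + 1 = ((i + 1 : Nat) : Int) := by push_cast; ring
    rw [hcast, PySem.List.pyGetD_natCast, List.getD_eq_getElem _ _ hi]

theorem pvZDiff_reverse (l : List Int) : pvZDiff l.reverse = (pvZDiff l).reverse := by
  unfold pvZDiff
  apply List.ext_getElem
  · simp
  · intro i h1 h2
    simp only [List.length_map, List.length_zip, List.length_tail, List.length_reverse] at h1 h2
    simp only [List.getElem_reverse, List.getElem_map, List.getElem_zip, List.getElem_tail,
      List.length_map, List.length_zip, List.length_tail]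
    rw [abs_sub_comm]
    congr 2 <;> exact getElem_congr_idx (by omega)

theorem pvZDiff_length (l : List Int) : (pvZDiff l).length = l.length - 1 := by
  simp [pvZDiff]

theorem pvZDiff_getElem (l : List Int) (k : Nat) (h : k < (pvZDiff l).length) :
    (pvZDiff l)[k] = |l.getD k 0 - l.getD (k + 1) 0| := by
  have hk : k + 1 < l.length := by
    have := pvZDiff_length l; omega
  simp only [pvZDiff, List.getElem_map, List.getElem_zip, List.getElem_tail]
  rw [List.getD_eq_getElem _ _ (by omega), List.getD_eq_getElem _ _ hk]

-- the loop is "Funny" iff every symmetric pair of adjacent differences in its window agrees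
theorem pvGetD_congr (l : List Int) (a b a' b' : Nat) (ha : a = a') (hb : b = b') :
    |l.getD a 0 - l.getD b 0| = |l.getD a' 0 - l.getD b' 0| := by rw [ha, hb]

theorem pvLoopB_iff (l : List Int) (N i j : Nat) (hN : j - i ≤ N) :
    pvLoopB l i j = "Funny" ↔
      ∀ k, i ≤ k → 2 * k < i + j →
        |l.getD k 0 - l.getD (k + 1) 0| = |l.getD (i + j - k) 0 - l.getD (i + j - k - 1) 0| := by
  induction N generalizing i j with
  | zero =>
    have hij : ¬ i < j := by omega
    rw [pvLoopB, if_neg hij]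
    constructor
    · intro _ k hk1 hk2; omega
    · intro _; rfl
  | succ N ih =>
    by_cases hij : i < j
    · rw [pvLoopB, if_pos hij]
      by_cases hchk : |l.getD i 0 - l.getD (i + 1) 0| = |l.getD j 0 - l.getD (j - 1) 0|
      · rw [if_neg (by simpa using hchk)]
        rw [ih (i + 1) (j - 1) (by omega)]
        constructor
        · intro h k hk1 hk2
          by_cases hk : k = i
          · rw [hk, show i + j - i = j by omega]
            exact hchk
          · have := h k (by omega) (by omega)
            have he : (i + 1) + (j - 1) = i + j := by omega
            rwa [he] at this
        · intro h k hk1 hk2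
          have he : (i + 1) + (j - 1) = i + j := by omega
          rw [he]
          exact h k (by omega) (by omega)
      · rw [if_pos (by simpa using hchk)]
        constructor
        · intro h; exact absurd h (by decide)
        · intro h
          exfalso
          apply hchk
          have := h i le_rfl (by omega)
          have he : i + j - i = j := by omega
          rwa [he] at this
    · rw [pvLoopB, if_neg hij]
      constructor
      · intro _ k hk1 hk2; omega
      · intro _; rfl

theorem pvLoopB_cases (l : List Int) (i j : Nat) :
    pvLoopB l i j = "Funny" ∨ pvLoopB l i j = "Not Funny" := by
  fun_induction pvLoopB l i j
  all_goals first | exact Or.inl rfl | exact Or.inr rfl | assumption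

-- the palindrome condition on the difference list equals the half-range two-pointer condition
theorem pvPalindrome_iff (l : List Int) :
    pvZDiff l = (pvZDiff l).reverse ↔
      ∀ k, 2 * k < l.length - 1 →
        |l.getD k 0 - l.getD (k + 1) 0|
          = |l.getD (l.length - 1 - k) 0 - l.getD (l.length - 1 - k - 1) 0| := by
  set m := (pvZDiff l).length with hm
  have hml : m = l.length - 1 := pvZDiff_length l
  constructor
  · intro hd k hk
    have hk' : k < m := by omega
    have h1 : (pvZDiff l)[k]'hk' = ((pvZDiff l).reverse)[k]'(by simpa using hk') := by
      exact getElem_congr_coll hd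
    rw [List.getElem_reverse] at h1
    rw [pvZDiff_getElem _ _ hk', pvZDiff_getElem _ _ (by omega)] at h1
    rw [h1, abs_sub_comm]
    exact pvGetD_congr l _ _ _ _ (by omega) (by omega)
  · intro h
    apply List.ext_getElem (by simp)
    intro k hk _
    rw [List.getElem_reverse]
    by_cases hhalf : 2 * k < m
    · have := h k (by omega)
      rw [pvZDiff_getElem _ _ hk, pvZDiff_getElem _ _ (by omega : m - 1 - k < (pvZDiff l).length)]
      rw [this, abs_sub_comm]
      exact pvGetD_congr l _ _ _ _ (by omega) (by omega)
    · have hk2 : 2 * (m - 1 - k) < l.length - 1 := by omega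
      have := h (m - 1 - k) hk2
      rw [pvZDiff_getElem _ _ hk, pvZDiff_getElem _ _ (by omega : m - 1 - k < (pvZDiff l).length)]
      rw [this, abs_sub_comm]
      exact pvGetD_congr l _ _ _ _ (by omega) (by omega)

-- ===== VERDICT (by name: the statement is the Claim_ definition above) =====
theorem funnyString_spec : Claim_equal_funnyString := by
  intro s _
  unfold Spec_funnyString funnyString funnyString_alt
  simp only [PySem.List.slice?_none_none_neg_one, Option.getD_some,
    pvAdjDiffA_eq_zdiff, pvZDiff_reverse]
  set l : List Int := s.toList.map (fun x => ((x.toNat : Int))) with hl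
  have hiff : pvZDiff l = (pvZDiff l).reverse ↔ pvLoopB l 0 (l.length - 1) = "Funny" := by
    rw [pvPalindrome_iff, pvLoopB_iff l (l.length - 1) 0 (l.length - 1) le_rfl]
    constructor
    · intro h k _ hk
      have := h k (by omega)
      have he : 0 + (l.length - 1) = l.length - 1 := by omega
      rwa [he]
    · intro h k hk
      have := h k (Nat.zero_le k) (by omega)
      have he : 0 + (l.length - 1) = l.length - 1 := by omega
      rwa [he] at this
  by_cases hp : pvZDiff l = (pvZDiff l).reverse
  · rw [if_pos hp]
    exact (hiff.1 hp).symm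
  · rw [if_neg hp]
    rcases pvLoopB_cases l 0 (l.length - 1) with h | h
    · exact absurd (hiff.2 h) hp
    · exact h.symm
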